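-- pv_equiv track=rewrite | github.com/moffa13/EngineDyno | dyno.py | find_probable_runs
-- ===== SOURCE A (Python) =====
-- def is_valid_numeric(value):
--     try:
--         value = float(value)
--         return value > 0  # Or >= 0 depending on what you want
--     except (ValueError, TypeError):
--         return False
--
-- def find_probable_runs(rows, filter_col_idx=2):
--     runs = []
--     current_start = None
--     prev_rpm = None
--
--     def save_run(start, end):
--         raw_run = rows[start:end]
--         runs.append(raw_run)
--
--     for i, row in enumerate(rows):
--         # Skip completely invalid rows
--         if not row or len(row) <= filter_col_idx or row[filter_col_idx] == '' or not is_valid_numeric(row[filter_col_idx]):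
--             if current_start is not None:
--                 save_run(current_start, i)
--                 current_start = None
--             prev_rpm = None
--             continue
--
--         curr_rpm_or_speed = float(row[filter_col_idx])
--
--         if prev_rpm is None:
--             current_start = i
--         elif curr_rpm_or_speed < prev_rpm:
--             save_run(current_start, i)
--             current_start = i
--
--         prev_rpm = curr_rpm_or_speed
--
--     # Save any remaining run
--     if current_start is not None:
--         save_run(current_start, len(rows))
--
--     return runs
-- ===== SOURCE B (Python) =====
-- def find_probable_runs(rows, filter_col_idx=2):
--     # stage 1: split rows into maximal segments of consecutive valid rows,
--     # keeping each kept row's original index and parsed value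
--     segments, seg = [], []
--     for i, row in enumerate(rows):
--         key = None
--         if row and len(row) > filter_col_idx and row[filter_col_idx] != '':
--             try:
--                 v = float(row[filter_col_idx])
--             except (ValueError, TypeError):
--                 v = None
--             if v is not None and v > 0:
--                 key = v
--         if key is None:
--             if seg:
--                 segments.append(seg)
--             seg = []
--         else:
--             seg.append((i, key))
--     if seg:
--         segments.append(seg)
--     # stage 2: cut each segment wherever the value drops below its predecessor
--     bounds = []
--     for s in segments:
--         start = s[0][0]
--         for (_, pv), (ci, cv) in zip(s, s[1:]):
--             if cv < pv:
--                 bounds.append((start, ci))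
--                 start = ci
--         bounds.append((start, s[-1][0] + 1))
--     # stage 3: emit the original-index slices
--     return [rows[a:b] for a, b in bounds]
-- ===== Notes on version B (the rewrite author's own statement) =====
-- stated objective: alternative
-- what changed: Replaces A's single flat pass with a mutable (runs, current_start, prev_rpm) accumulator by three staged passes: first split the rows into maximal segments of consecutive valid rows (recording original index and parsed value), then cut each segment wherever the value drops below its predecessor into (start, end) index pairs, and finally emit rows[start:end] for every pair.
import Mathlib
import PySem

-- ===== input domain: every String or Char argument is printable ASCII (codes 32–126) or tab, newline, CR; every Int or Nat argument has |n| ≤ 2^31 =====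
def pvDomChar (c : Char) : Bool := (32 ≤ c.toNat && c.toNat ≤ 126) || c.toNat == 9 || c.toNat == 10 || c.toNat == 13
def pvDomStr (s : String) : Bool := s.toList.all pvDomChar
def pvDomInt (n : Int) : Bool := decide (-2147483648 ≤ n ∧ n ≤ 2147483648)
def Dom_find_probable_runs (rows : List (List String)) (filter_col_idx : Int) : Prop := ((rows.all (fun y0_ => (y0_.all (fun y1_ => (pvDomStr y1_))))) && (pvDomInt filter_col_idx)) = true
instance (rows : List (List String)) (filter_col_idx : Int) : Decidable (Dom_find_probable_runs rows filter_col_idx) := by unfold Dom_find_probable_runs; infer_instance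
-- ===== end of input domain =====

-- B replaces A's single flat pass with its (runs, current_start, prev_rpm) accumulator by
-- three staged passes: segment the rows into maximal stretches of consecutive valid rows,
-- cut each segment where the value drops, then emit the recorded index slices
-- (objective: alternative decomposition, same cost).

-- ===== PORT A =====
-- Model of CPython float() used by A's calls: nan, ±inf, or a finite double, i.e. the
-- rational obtained by round-to-nearest-even of the decimal literal to IEEE binary64
-- (subnormals and overflow included).  Exact on the ASCII domain.
inductive PF where
  | nan : PF
  | pinf : PF
  | ninf : PF
  | fin : ℚ → PF
deriving DecidableEq, Repr

-- Python: value > 0 (on floats; nan > 0 is False)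
def fpos : PF → Bool
  | .pinf => true
  | .fin q => decide (0 < q)
  | _ => false

-- Python: a < b on floats (any comparison with nan is False)
def flt : PF → PF → Bool
  | .fin a, .fin b => decide (a < b)
  | .fin _, .pinf => true
  | .ninf, .fin _ => true
  | .ninf, .pinf => true
  | _, _ => false

-- digitpart := digit (["_"] digit)* ; consumes greedily, returns digits with underscores removed
def dpGo (acc : List Char) : List Char → List Char × List Char
  | [] => (acc, [])
  | c :: rest =>
    if c.isDigit then dpGo (acc ++ [c]) rest
    else if c = '_' then
      match rest with
      | d :: r => if d.isDigit then dpGo (acc ++ [d]) r else (acc, c :: rest)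
      | [] => (acc, [c])
    else (acc, c :: rest)
termination_by cs => cs.length
decreasing_by
  all_goals simp_all
  all_goals omega

def digitpart? : List Char → Option (List Char × List Char)
  | [] => none
  | c :: rest => if c.isDigit then some (dpGo [c] rest) else none

def natOfDigits (ds : List Char) : ℕ := ds.foldl (fun a c => a * 10 + (c.toNat - 48)) 0

-- round-half-even of a rational to an integer
def roundHalfEven (m : ℚ) : ℤ :=
  let fl := ⌊m⌋
  let fr := m - fl
  if fr < 1/2 then fl else if 1/2 < fr then fl + 1 else if fl % 2 = 0 then fl else fl + 1

-- round a positive rational to the nearest double (none = overflow to +inf);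
-- IEEE-754 binary64: unit in the last place 2^(e-52) clamped at 2^-1074 (subnormals)
def roundMag (q : ℚ) : Option ℚ :=
  let e : ℤ := Int.log 2 q
  let u : ℤ := max (e - 52) (-1074)
  let n : ℤ := roundHalfEven (q / (2:ℚ) ^ u)
  let r : ℚ := (n : ℚ) * (2:ℚ) ^ u
  if (2:ℚ) ^ (1024:ℤ) ≤ r then none else some r

def mkVal (mant : List Char) (fraclen : ℕ) (exp10 : ℤ) : ℚ :=
  (natOfDigits mant : ℚ) * (10:ℚ) ^ (exp10 - (fraclen : ℤ))

-- optional exponent sign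
def signSplit : List Char → ℤ × List Char
  | '+' :: rr => (1, rr)
  | '-' :: rr => (-1, rr)
  | r => (1, r)

-- exponent suffix [eE [sign] digitpart] then end of string
def parseExp (mant : List Char) (fraclen : ℕ) : List Char → Option ℚ
  | [] => some (mkVal mant fraclen 0)
  | c :: r =>
    if c = 'e' ∨ c = 'E' then
      let (es, r2) : ℤ × List Char := signSplit r
      match digitpart? r2 with
      | some (d3, []) => some (mkVal mant fraclen (es * (natOfDigits d3 : ℤ)))
      | _ => none
    else none

-- a digitpart if one starts here, else nothing consumed
def dpOr (cs : List Char) : List Char × List Char :=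
  match digitpart? cs with
  | some dr => dr
  | none => ([], cs)

-- after the integer digits: optional fraction, then exponent
def afterInt (d1 : List Char) : List Char → Option ℚ
  | '.' :: r =>
    let (d2, r2) := dpOr r
    if d1 = [] ∧ d2 = [] then none else parseExp (d1 ++ d2) d2.length r2
  | r1 => if d1 = [] then none else parseExp d1 0 r1

-- digits ["." digits] [exp]  (magnitude after the sign); none = ValueError
def parseMag (cs : List Char) : Option ℚ :=
  let (d1, r1) := dpOr cs
  afterInt d1 r1

-- float(s): strip whitespace, optional sign, inf/infinity/nan (case-insensitive) or a
-- decimal literal rounded to double.  none = ValueError.  Exact on ASCII.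
def pySignSplit : List Char → Bool × List Char
  | '+' :: r => (false, r)
  | '-' :: r => (true, r)
  | cs => (false, cs)

def pyFloat? (s : String) : Option PF :=
  let (neg, cs1) : Bool × List Char := pySignSplit (PySem.Chars.strip s.toList)
  let low := PySem.Chars.lower cs1
  if low = ['i','n','f'] ∨ low = ['i','n','f','i','n','i','t','y'] then some (if neg then .ninf else .pinf)
  else if low = ['n','a','n'] then some .nan
  else
    match parseMag cs1 with
    | none => none
    | some q =>
      if q = 0 then some (.fin 0)
      else
        match roundMag q with
        | none => some (if neg then .ninf else .pinf)
        | some r => some (.fin (if neg then -r else r))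

def is_valid_numeric (s : String) : Bool :=
  match pyFloat? s with
  | none => false          -- ValueError caught → False
  | some v => fpos v       -- value > 0

-- the for-loop of A: state (runs, current_start, prev_rpm); save_run start end appends rows[start:end]
def loopA (rows : List (List String)) (f : Int) :
    List (Int × List String) →
    List (List (List String)) × Option Int × Option PF →
    List (List (List String)) × Option Int × Option PF
  | [], st => st
  | (i, row) :: rest, (runs, cs, prev) =>
    if row.isEmpty || decide ((PySem.List.len row) ≤ f) ||
        (match PySem.List.pyGet? row f with
         | none => true            -- IndexError (outside Pre_)
         | some s => decide (s = "") || !is_valid_numeric s) then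
      loopA rows f rest
        ((match cs with
          | some st' => runs ++ [PySem.List.slice rows (some st') (some i)]
          | none => runs), none, none)
    else
      let v : PF := match PySem.List.pyGet? row f with
        | none => PF.nan           -- unreachable here (outside Pre_)
        | some s => (pyFloat? s).getD PF.nan
      match prev with
      | none => loopA rows f rest (runs, some i, some v)
      | some p =>
        if flt v p then
          match cs with
          | some st' => loopA rows f rest (runs ++ [PySem.List.slice rows (some st') (some i)], some i, some v)
          | none => loopA rows f rest (runs, some i, some v)   -- unreachable: prev set ⇒ current_start set
        else loopA rows f rest (runs, cs, some v)

def find_probable_runs (rows : List (List String)) (filter_col_idx : Int) : List (List (List String)) :=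
  match loopA rows filter_col_idx (PySem.List.enumerate rows 0) ([], none, none) with
  | (runs, some s, _) => runs ++ [PySem.List.slice rows (some s) (some (PySem.List.len rows))]
  | (runs, none, _) => runs

-- ===== PORT B =====
-- B's model of "float(cell) succeeds and is > 0, yielding a comparable key": a one-pass
-- DFA over the characters of the numeric literal (grammar digitpart [. digitpart] [eE
-- sign digitpart] with '_' between digits), accumulating mantissa / fraction length /
-- exponent on the fly, then the identical IEEE binary64 rounding step.  Keys are
-- WithTop ℚ (⊤ = +inf); nan, -inf and nonpositive values are invalid anyway.  Exact on ASCII.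
inductive BSt where
  | s0 | i | iu | p0 | pi | f | fu | e0 | es | x | xu | rj
deriving DecidableEq, Repr

def pvStep (st : BSt × ℕ × ℕ × ℕ × Bool) (c : Char) : BSt × ℕ × ℕ × ℕ × Bool :=
  match st with
  | (q, m, fl, ex, en) =>
    let dv := c.toNat - 48
    match q with
    | .s0 => if c.isDigit then (.i, m * 10 + dv, fl, ex, en)
             else if c = '.' then (.p0, m, fl, ex, en)
             else (.rj, m, fl, ex, en)
    | .i  => if c.isDigit then (.i, m * 10 + dv, fl, ex, en)
             else if c = '_' then (.iu, m, fl, ex, en)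
             else if c = '.' then (.pi, m, fl, ex, en)
             else if c = 'e' ∨ c = 'E' then (.e0, m, fl, ex, en)
             else (.rj, m, fl, ex, en)
    | .iu => if c.isDigit then (.i, m * 10 + dv, fl, ex, en) else (.rj, m, fl, ex, en)
    | .p0 => if c.isDigit then (.f, m * 10 + dv, fl + 1, ex, en) else (.rj, m, fl, ex, en)
    | .pi => if c.isDigit then (.f, m * 10 + dv, fl + 1, ex, en)
             else if c = 'e' ∨ c = 'E' then (.e0, m, fl, ex, en)
             else (.rj, m, fl, ex, en)
    | .f  => if c.isDigit then (.f, m * 10 + dv, fl + 1, ex, en)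
             else if c = '_' then (.fu, m, fl, ex, en)
             else if c = 'e' ∨ c = 'E' then (.e0, m, fl, ex, en)
             else (.rj, m, fl, ex, en)
    | .fu => if c.isDigit then (.f, m * 10 + dv, fl + 1, ex, en) else (.rj, m, fl, ex, en)
    | .e0 => if c.isDigit then (.x, m, fl, ex * 10 + dv, en)
             else if c = '+' then (.es, m, fl, ex, false)
             else if c = '-' then (.es, m, fl, ex, true)
             else (.rj, m, fl, ex, en)
    | .es => if c.isDigit then (.x, m, fl, ex * 10 + dv, en) else (.rj, m, fl, ex, en)
    | .x  => if c.isDigit then (.x, m, fl, ex * 10 + dv, en)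
             else if c = '_' then (.xu, m, fl, ex, en)
             else (.rj, m, fl, ex, en)
    | .xu => if c.isDigit then (.x, m, fl, ex * 10 + dv, en) else (.rj, m, fl, ex, en)
    | .rj => st

def pvFin : BSt × ℕ × ℕ × ℕ × Bool → Option ℚ
  | (q, m, fl, ex, en) =>
    if q = .i ∨ q = .pi ∨ q = .f ∨ q = .x then
      some ((m : ℚ) * (10:ℚ) ^ ((if en then -(ex:ℤ) else (ex:ℤ)) - (fl:ℤ)))
    else none

def pvLit? (t : List Char) : Option ℚ :=
  pvFin (t.foldl pvStep (BSt.s0, 0, 0, 0, false))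

-- nearest binary64 of a positive rational (none = overflow), round half to even
def pvDbl (v : ℚ) : Option ℚ :=
  let u : ℤ := max (Int.log 2 v - 52) (-1074)
  let t : ℚ := v / (2:ℚ) ^ u
  let w : ℤ := ⌊t⌋
  let rem : ℚ := t - (w : ℚ)
  let n : ℤ := if 1/2 < rem ∨ (rem = 1/2 ∧ w % 2 ≠ 0) then w + 1 else w
  let d : ℚ := (n : ℚ) * (2:ℚ) ^ u
  if d < (2:ℚ) ^ (1024:ℤ) then some d else none

def pvSign : List Char → Bool × List Char
  | '+' :: t => (false, t)
  | '-' :: t => (true, t)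
  | t => (false, t)

-- some key ⇔ float(cell) succeeds with a value > 0; the key compares like that float
def pvPosKey? (s : String) : Option (WithTop ℚ) :=
  let sg := pvSign (PySem.Chars.strip s.toList)
  let w := PySem.Chars.lower sg.2
  if w = ['i','n','f'] ∨ w = ['i','n','f','i','n','i','t','y'] then
    if sg.1 then none else some ⊤
  else if w = ['n','a','n'] then none
  else
    match pvLit? sg.2 with
    | none => none
    | some v =>
      if sg.1 ∨ v = 0 then none
      else
        match pvDbl v with
        | none => some ⊤
        | some d => if d = 0 then none else some (d : WithTop ℚ)

-- the validity test of Source B's stage 1, fused with the parse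
def pvKeyRow (fc : Int) (r : List String) : Option (WithTop ℚ) :=
  if r.isEmpty || decide ((PySem.List.len r) ≤ fc) then none
  else
    match PySem.List.pyGet? r fc with
    | none => none               -- IndexError (outside Pre_)
    | some cell => if cell = "" then none else pvPosKey? cell

-- stage 1: maximal segments of consecutive valid rows as (index, key) pairs
def pvSegGo (fc : Int) : ℕ → List (List String) → List (List (ℕ × WithTop ℚ)) →
    List (ℕ × WithTop ℚ) → List (List (ℕ × WithTop ℚ))
  | _, [], acc, seg => if seg.isEmpty then acc else acc ++ [seg]
  | ix, r :: rest, acc, seg =>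
    match pvKeyRow fc r with
    | none => pvSegGo fc (ix + 1) rest (if seg.isEmpty then acc else acc ++ [seg]) []
    | some k => pvSegGo fc (ix + 1) rest acc (seg ++ [(ix, k)])

-- stage 2 inner loop: cut where the value drops below its predecessor
def pvCuts : ℕ → List ((ℕ × WithTop ℚ) × (ℕ × WithTop ℚ)) → ℕ → List (ℕ × ℕ)
  | st, [], fin => [(st, fin)]
  | st, (pr, cu) :: ps, fin =>
    if cu.2 < pr.2 then (st, cu.1) :: pvCuts cu.1 ps fin else pvCuts st ps fin

def pvSegBounds (seg : List (ℕ × WithTop ℚ)) : List (ℕ × ℕ) :=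
  match seg with
  | [] => []
  | (i0, _) :: _ => pvCuts i0 (seg.zip seg.tail) ((seg.getLastD (0, ⊤)).1 + 1)

def find_probable_runs_alt (rows : List (List String)) (filter_col_idx : Int) : List (List (List String)) :=
  ((pvSegGo filter_col_idx 0 rows [] []).flatMap pvSegBounds).map
    (fun ab => PySem.List.slice rows (some (ab.1 : Int)) (some (ab.2 : Int)))

-- ===== PRECONDITION & SPEC =====
-- Pre_ excludes exactly the inputs where Python raises IndexError: a negative
-- filter_col_idx that passes the 'len(row) <= filter_col_idx' guard on some nonempty row
-- but reaches past its front (filter_col_idx < -len(row)).  Both A and B raise there.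
def Pre_find_probable_runs (rows : List (List String)) (filter_col_idx : Int) : Prop :=
  ∀ row ∈ rows, (row ≠ [] ∧ filter_col_idx < (row.length : Int)) → -(row.length : Int) ≤ filter_col_idx

instance (rows : List (List String)) (filter_col_idx : Int) : Decidable (Pre_find_probable_runs rows filter_col_idx) := by
  unfold Pre_find_probable_runs; infer_instance

def pvWitness_find_probable_runs : List (List String) × Int :=
  ([["t", "x", "1000"], ["t", "x", "1500"], ["t", "x", "1200"], ["bad"], ["t", "x", "2.5"]], 2)

def Spec_find_probable_runs (rows : List (List String)) (filter_col_idx : Int) (out : List (List (List String))) : Prop := out = find_probable_runs_alt rows filter_col_idx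
instance (rows : List (List String)) (filter_col_idx : Int) (out : List (List (List String))) : Decidable (Spec_find_probable_runs rows filter_col_idx out) := by unfold Spec_find_probable_runs; infer_instance

-- ===== CLAIM (what is proved, stated in full; the proofs are below) =====
def Claim_equal_find_probable_runs : Prop := ∀ (rows : List (List String)) (filter_col_idx : Int), Dom_find_probable_runs rows filter_col_idx → Pre_find_probable_runs rows filter_col_idx → Spec_find_probable_runs rows filter_col_idx (find_probable_runs rows filter_col_idx)

-- ===== LEMMAS AND PROOFS =====

theorem dpGo_acc : ∀ (n : ℕ) (l : List Char), l.length ≤ n → ∀ acc, dpGo acc l = (acc ++ (dpGo [] l).1, (dpGo [] l).2) := by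
  intro n
  induction n with
  | zero =>
    intro l hl acc
    have h0 : l = [] := by cases l <;> simp_all
    subst h0; simp [dpGo]
  | succ n ih =>
    intro l hl acc
    match l with
    | [] => simp [dpGo]
    | c :: rest =>
      rw [dpGo.eq_def, dpGo.eq_def (acc := [])]
      by_cases hd : c.isDigit
      · simp only [hd, if_pos]
        rw [ih rest (by simpa using hl) (acc ++ [c]), ih rest (by simpa using hl) ([] ++ [c])]
        simp
      · simp only [hd, if_neg, Bool.false_eq_true, if_false]
        by_cases hu : c = '_'
        · simp only [hu, if_pos]
          match rest with
          | [] => simp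
          | d :: r =>
            by_cases hdd : d.isDigit
            · simp only [hdd, if_pos]
              rw [ih r (by simp at hl; omega) (acc ++ [d]), ih r (by simp at hl; omega) ([] ++ [d])]
              simp
            · simp [hdd]
        · simp [hu]

def dnum (m : ℕ) (ds : List Char) : ℕ := ds.foldl (fun a c => a * 10 + (c.toNat - 48)) m

theorem dnum_append (m : ℕ) (p q : List Char) : dnum m (p ++ q) = dnum (dnum m p) q := by
  simp [dnum]

theorem natOfDigits_eq_dnum (ds : List Char) : natOfDigits ds = dnum 0 ds := rfl

theorem dp0_suffix : ∀ (n : ℕ) (l : List Char), l.length ≤ n →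
    ((dpGo [] l).2 = [] ∨
     ∃ c r, (dpGo [] l).2 = c :: r ∧ c.isDigit = false ∧
       (c = '_' → r = [] ∨ ∃ d r', r = d :: r' ∧ d.isDigit = false)) := by
  intro n
  induction n with
  | zero =>
    intro l hl
    have h0 : l = [] := by cases l <;> simp_all
    subst h0; left; simp [dpGo]
  | succ n ih =>
    intro l hl
    match l with
    | [] => left; simp [dpGo]
    | c :: rest =>
      rw [dpGo.eq_def]
      by_cases hd : c.isDigit
      · simp only [hd, if_pos]
        rw [dpGo_acc (n := rest.length) rest le_rfl]
        exact ih rest (by simpa using hl)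
      · simp only [hd, Bool.false_eq_true, if_false]
        by_cases hu : c = '_'
        · simp only [hu, if_pos]
          match rest with
          | [] =>
            right; exact ⟨'_', [], rfl, by decide, fun _ => Or.inl rfl⟩
          | d :: r =>
            by_cases hdd : d.isDigit
            · simp only [hdd, if_pos]
              rw [dpGo_acc (n := r.length) r le_rfl]
              exact ih r (by simp at hl; omega)
            · simp only [hdd, Bool.false_eq_true, if_false]
              right
              exact ⟨'_', d :: r, rfl, by decide, fun _ => Or.inr ⟨d, r, rfl, by simpa using hdd⟩⟩
        · simp only [hu, if_neg, if_false]
          right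
          refine ⟨c, rest, rfl, by simpa using hd, fun hc => absurd hc hu⟩

theorem simRj : ∀ (l : List Char) (m fl ex : ℕ) (en : Bool),
    List.foldl pvStep (BSt.rj, m, fl, ex, en) l = (BSt.rj, m, fl, ex, en) := by
  intro l
  induction l with
  | nil => intros; rfl
  | cons c r ih => intro m fl ex en; simpa [pvStep] using ih m fl ex en

theorem simI : ∀ (n : ℕ) (l : List Char), l.length ≤ n → ∀ (m fl ex : ℕ) (en : Bool),
    List.foldl pvStep (BSt.i, m, fl, ex, en) l
      = List.foldl pvStep (BSt.i, dnum m (dpGo [] l).1, fl, ex, en) (dpGo [] l).2 := by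
  intro n
  induction n with
  | zero =>
    intro l hl m fl ex en
    have h0 : l = [] := by cases l <;> simp_all
    subst h0; simp [dpGo, dnum]
  | succ n ih =>
    intro l hl m fl ex en
    match l with
    | [] => simp [dpGo, dnum]
    | c :: rest =>
      rw [dpGo.eq_def]
      by_cases hd : c.isDigit
      · simp only [hd, if_pos]
        rw [dpGo_acc (n := rest.length) rest le_rfl]
        have step1 : List.foldl pvStep (BSt.i, m, fl, ex, en) (c :: rest)
            = List.foldl pvStep (BSt.i, m * 10 + (c.toNat - 48), fl, ex, en) rest := by
          simp [pvStep, hd]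
        rw [step1, ih rest (by simpa using hl)]
        simp [dnum]
      · simp only [hd, Bool.false_eq_true, if_false]
        by_cases hu : c = '_'
        · simp only [hu, if_pos]
          match rest with
          | [] => simp [dnum]
          | d :: r =>
            by_cases hdd : d.isDigit
            · simp only [hdd, if_pos]
              rw [dpGo_acc (n := r.length) r le_rfl]
              have step2 : List.foldl pvStep (BSt.i, m, fl, ex, en) ('_' :: d :: r)
                  = List.foldl pvStep (BSt.i, m * 10 + (d.toNat - 48), fl, ex, en) r := by
                simp [pvStep, hdd]
              rw [step2, ih r (by simp at hl; omega)]
              simp [dnum]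
            · simp only [hdd, Bool.false_eq_true, if_false]
              simp [dnum]
        · simp only [hu, if_false]
          simp [dnum]

theorem simF : ∀ (n : ℕ) (l : List Char), l.length ≤ n → ∀ (m fl ex : ℕ) (en : Bool),
    List.foldl pvStep (BSt.f, m, fl, ex, en) l
      = List.foldl pvStep (BSt.f, dnum m (dpGo [] l).1, fl + (dpGo [] l).1.length, ex, en) (dpGo [] l).2 := by
  intro n
  induction n with
  | zero =>
    intro l hl m fl ex en
    have h0 : l = [] := by cases l <;> simp_all
    subst h0; simp [dpGo, dnum]
  | succ n ih =>
    intro l hl m fl ex en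
    match l with
    | [] => simp [dpGo, dnum]
    | c :: rest =>
      rw [dpGo.eq_def]
      by_cases hd : c.isDigit
      · simp only [hd, if_pos]
        rw [dpGo_acc (n := rest.length) rest le_rfl]
        have step1 : List.foldl pvStep (BSt.f, m, fl, ex, en) (c :: rest)
            = List.foldl pvStep (BSt.f, m * 10 + (c.toNat - 48), fl + 1, ex, en) rest := by
          simp [pvStep, hd]
        rw [step1, ih rest (by simpa using hl)]
        simp [dnum, Nat.add_assoc, Nat.add_comm, Nat.add_left_comm]
      · simp only [hd, Bool.false_eq_true, if_false]
        by_cases hu : c = '_'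
        · simp only [hu, if_pos]
          match rest with
          | [] => simp [dnum]
          | d :: r =>
            by_cases hdd : d.isDigit
            · simp only [hdd, if_pos]
              rw [dpGo_acc (n := r.length) r le_rfl]
              have step2 : List.foldl pvStep (BSt.f, m, fl, ex, en) ('_' :: d :: r)
                  = List.foldl pvStep (BSt.f, m * 10 + (d.toNat - 48), fl + 1, ex, en) r := by
                simp [pvStep, hdd]
              rw [step2, ih r (by simp at hl; omega)]
              simp [dnum, Nat.add_assoc, Nat.add_comm, Nat.add_left_comm]
            · simp only [hdd, Bool.false_eq_true, if_false]
              simp [dnum]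
        · simp only [hu, if_false]
          simp [dnum]

theorem simX : ∀ (n : ℕ) (l : List Char), l.length ≤ n → ∀ (m fl ex : ℕ) (en : Bool),
    List.foldl pvStep (BSt.x, m, fl, ex, en) l
      = List.foldl pvStep (BSt.x, m, fl, dnum ex (dpGo [] l).1, en) (dpGo [] l).2 := by
  intro n
  induction n with
  | zero =>
    intro l hl m fl ex en
    have h0 : l = [] := by cases l <;> simp_all
    subst h0; simp [dpGo, dnum]
  | succ n ih =>
    intro l hl m fl ex en
    match l with
    | [] => simp [dpGo, dnum]
    | c :: rest =>
      rw [dpGo.eq_def]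
      by_cases hd : c.isDigit
      · simp only [hd, if_pos]
        rw [dpGo_acc (n := rest.length) rest le_rfl]
        have step1 : List.foldl pvStep (BSt.x, m, fl, ex, en) (c :: rest)
            = List.foldl pvStep (BSt.x, m, fl, ex * 10 + (c.toNat - 48), en) rest := by
          simp [pvStep, hd]
        rw [step1, ih rest (by simpa using hl)]
        simp [dnum]
      · simp only [hd, Bool.false_eq_true, if_false]
        by_cases hu : c = '_'
        · simp only [hu, if_pos]
          match rest with
          | [] => simp [dnum]
          | d :: r =>
            by_cases hdd : d.isDigit
            · simp only [hdd, if_pos]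
              rw [dpGo_acc (n := r.length) r le_rfl]
              have step2 : List.foldl pvStep (BSt.x, m, fl, ex, en) ('_' :: d :: r)
                  = List.foldl pvStep (BSt.x, m, fl, ex * 10 + (d.toNat - 48), en) r := by
                simp [pvStep, hdd]
              rw [step2, ih r (by simp at hl; omega)]
              simp [dnum]
            · simp only [hdd, Bool.false_eq_true, if_false]
              simp [dnum]
        · simp only [hu, if_false]
          simp [dnum]

theorem pvFin_rj (m fl ex : ℕ) (en : Bool) : pvFin (BSt.rj, m, fl, ex, en) = none := rfl

-- after the run in state .x with nonempty leftover, the fold rejects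
theorem xTail_rej : ∀ (s : List Char) (c : Char) (r : List Char) (m fl ex : ℕ) (en : Bool),
    s = c :: r → c.isDigit = false →
    (c = '_' → r = [] ∨ ∃ d r', r = d :: r' ∧ d.isDigit = false) →
    pvFin (List.foldl pvStep (BSt.x, m, fl, ex, en) s) = none := by
  intro s c r m fl ex en hs hcd hund
  subst hs
  by_cases hu : c = '_'
  · subst hu
    have step1 : List.foldl pvStep (BSt.x, m, fl, ex, en) ('_' :: r)
        = List.foldl pvStep (BSt.xu, m, fl, ex, en) r := by simp [pvStep]
    rw [step1]
    rcases hund rfl with h0 | ⟨d, r', hr, hd⟩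
    · subst h0; rfl
    · subst hr
      have step2 : List.foldl pvStep (BSt.xu, m, fl, ex, en) (d :: r')
          = List.foldl pvStep (BSt.rj, m, fl, ex, en) r' := by simp [pvStep, hd]
      rw [step2, simRj, pvFin_rj]
  · have step1 : List.foldl pvStep (BSt.x, m, fl, ex, en) (c :: r)
        = List.foldl pvStep (BSt.rj, m, fl, ex, en) r := by simp [pvStep, hcd, hu]
    rw [step1, simRj, pvFin_rj]

theorem simE : ∀ (r : List Char) (m fl : ℕ) (mant : List Char) (c : Char),
    natOfDigits mant = m → (c = 'e' ∨ c = 'E') →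
    pvFin (List.foldl pvStep (BSt.e0, m, fl, 0, false) r) = parseExp mant fl (c :: r) := by
  intro r m fl mant c hm hce
  have hif : (c = 'e' ∨ c = 'E') = True := by simp [hce]
  rw [parseExp.eq_def]
  simp only [hif, if_true]
  -- digit-run helper: from state .x after first exponent digit
  have hrun : ∀ (rr2 : List Char) (d : Char), d.isDigit = true → ∀ (en : Bool),
      (match digitpart? (d :: rr2) with
       | some (d3, []) => some (mkVal mant fl ((if en then (-1 : ℤ) else 1) * (natOfDigits d3 : ℤ)))
       | _ => none)
      = pvFin (List.foldl pvStep (BSt.x, m, fl, d.toNat - 48, en) rr2) := by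
    intro rr2 d hd en
    rw [simX rr2.length rr2 le_rfl]
    have hdp : digitpart? (d :: rr2) = some (d :: (dpGo [] rr2).1, (dpGo [] rr2).2) := by
      simp [digitpart?, hd]
      rw [dpGo_acc rr2.length rr2 le_rfl]
      simp
    rw [hdp]
    rcases dp0_suffix rr2.length rr2 le_rfl with h0 | ⟨c', r'', hs, hcd, hund⟩
    · rw [h0]
      simp only [List.foldl_nil]
      have hnd : natOfDigits (d :: (dpGo [] rr2).1) = dnum (d.toNat - 48) (dpGo [] rr2).1 := by
        simp [natOfDigits, dnum]
      cases en <;> simp [pvFin, mkVal, hm, hnd]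
    · rw [hs]
      rw [xTail_rej (c' :: r'') c' r'' _ _ _ _ rfl hcd hund]
  cases r with
  | nil => simp [pvFin, digitpart?, signSplit]
  | cons d0 rr =>
    by_cases hp : d0 = '+'
    · subst hp
      have st1 : List.foldl pvStep (BSt.e0, m, fl, 0, false) ('+' :: rr)
          = List.foldl pvStep (BSt.es, m, fl, 0, false) rr := by simp [pvStep]
      rw [st1]
      cases rr with
      | nil => simp [pvFin, digitpart?, signSplit]
      | cons d rr2 =>
        by_cases hd : d.isDigit
        · have st2 : List.foldl pvStep (BSt.es, m, fl, 0, false) (d :: rr2)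
              = List.foldl pvStep (BSt.x, m, fl, d.toNat - 48, false) rr2 := by
            simp [pvStep, hd]
          rw [st2, ← hrun rr2 d hd false]
          simp [signSplit]
        · have st2 : List.foldl pvStep (BSt.es, m, fl, 0, false) (d :: rr2)
              = List.foldl pvStep (BSt.rj, m, fl, 0, false) rr2 := by
            simp [pvStep, hd]
          rw [st2, simRj, pvFin_rj]
          simp [signSplit, digitpart?, hd]
    · by_cases hmn : d0 = '-'
      · subst hmn
        have st1 : List.foldl pvStep (BSt.e0, m, fl, 0, false) ('-' :: rr)
            = List.foldl pvStep (BSt.es, m, fl, 0, true) rr := by simp [pvStep]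
        rw [st1]
        cases rr with
        | nil => simp [pvFin, digitpart?, signSplit]
        | cons d rr2 =>
          by_cases hd : d.isDigit
          · have st2 : List.foldl pvStep (BSt.es, m, fl, 0, true) (d :: rr2)
                = List.foldl pvStep (BSt.x, m, fl, d.toNat - 48, true) rr2 := by
              simp [pvStep, hd]
            rw [st2, ← hrun rr2 d hd true]
            simp [signSplit]
          · have st2 : List.foldl pvStep (BSt.es, m, fl, 0, true) (d :: rr2)
                = List.foldl pvStep (BSt.rj, m, fl, 0, true) rr2 := by
              simp [pvStep, hd]
            rw [st2, simRj, pvFin_rj]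
            simp [signSplit, digitpart?, hd]
      · by_cases hd : d0.isDigit
        · have st1 : List.foldl pvStep (BSt.e0, m, fl, 0, false) (d0 :: rr)
              = List.foldl pvStep (BSt.x, m, fl, d0.toNat - 48, false) rr := by
            simp [pvStep, hd, hp, hmn]
          rw [st1, ← hrun rr d0 hd false]
          have hsign : signSplit (d0 :: rr) = (1, d0 :: rr) := by
            simp [signSplit, hp, hmn]
          simp only [hsign]
          simp
        · have st1 : List.foldl pvStep (BSt.e0, m, fl, 0, false) (d0 :: rr)
              = List.foldl pvStep (BSt.rj, m, fl, 0, false) rr := by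
            simp [pvStep, hd, hp, hmn]
          rw [st1, simRj, pvFin_rj]
          have hsign : signSplit (d0 :: rr) = (1, d0 :: rr) := by
            simp [signSplit, hp, hmn]
          simp only [hsign]
          simp [digitpart?, hd]

-- from an accepting mantissa state, the leftover (whose head is no digit) behaves as parseExp
theorem simT : ∀ (q : BSt) (s : List Char) (m fl : ℕ) (mant : List Char),
    natOfDigits mant = m →
    (q = BSt.i ∨ q = BSt.pi ∨ q = BSt.f) →
    (∀ c r, s = c :: r → c.isDigit = false) →
    ((q = BSt.i ∨ q = BSt.f) → ∀ r, s = '_' :: r → r = [] ∨ ∃ d r', r = d :: r' ∧ d.isDigit = false) →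
    (q = BSt.i → ∀ r, s ≠ '.' :: r) →
    pvFin (List.foldl pvStep (q, m, fl, 0, false) s) = parseExp mant fl s := by
  intro q s m fl mant hm hq hnd hund hdot
  cases s with
  | nil =>
    rcases hq with h | h | h <;> subst h <;>
      simp [pvFin, parseExp, mkVal, hm]
  | cons c r =>
    have hcd : c.isDigit = false := hnd c r rfl
    by_cases hce : c = 'e' ∨ c = 'E'
    · have st1 : List.foldl pvStep (q, m, fl, 0, false) (c :: r)
          = List.foldl pvStep (BSt.e0, m, fl, 0, false) r := by
        rcases hq with h | h | h <;> subst h <;>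
          rcases hce with h2 | h2 <;> subst h2 <;> simp [pvStep]
      rw [st1]
      exact simE r m fl mant c hm hce
    · push_neg at hce
      rw [parseExp.eq_def]
      simp only [hce.1, hce.2, or_self, if_false]
      by_cases hu : c = '_'
      · subst hu
        rcases hq with h | h | h
        · subst h
          have st1 : List.foldl pvStep (BSt.i, m, fl, 0, false) ('_' :: r)
              = List.foldl pvStep (BSt.iu, m, fl, 0, false) r := by simp [pvStep]
          rw [st1]
          rcases hund (Or.inl rfl) r rfl with h0 | ⟨d, r', hr, hdg⟩
          · subst h0; rfl
          · subst hr
            have st2 : List.foldl pvStep (BSt.iu, m, fl, 0, false) (d :: r')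
                = List.foldl pvStep (BSt.rj, m, fl, 0, false) r' := by simp [pvStep, hdg]
            rw [st2, simRj, pvFin_rj]
        · subst h
          have st1 : List.foldl pvStep (BSt.pi, m, fl, 0, false) ('_' :: r)
              = List.foldl pvStep (BSt.rj, m, fl, 0, false) r := by simp [pvStep]
          rw [st1, simRj, pvFin_rj]
        · subst h
          have st1 : List.foldl pvStep (BSt.f, m, fl, 0, false) ('_' :: r)
              = List.foldl pvStep (BSt.fu, m, fl, 0, false) r := by simp [pvStep]
          rw [st1]
          rcases hund (Or.inr rfl) r rfl with h0 | ⟨d, r', hr, hdg⟩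
          · subst h0; rfl
          · subst hr
            have st2 : List.foldl pvStep (BSt.fu, m, fl, 0, false) (d :: r')
                = List.foldl pvStep (BSt.rj, m, fl, 0, false) r' := by simp [pvStep, hdg]
            rw [st2, simRj, pvFin_rj]
      · -- c is no digit, not e/E, not '_': reject (for .i also not '.', for .pi/.f '.' rejects too)
        have st1 : List.foldl pvStep (q, m, fl, 0, false) (c :: r)
            = List.foldl pvStep (BSt.rj, m, fl, 0, false) r := by
          rcases hq with h | h | h <;> subst h
          · have hdot' : c ≠ '.' := by
              intro hc; exact hdot rfl r (by rw [hc])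
            simp [pvStep, hcd, hu, hdot', hce.1, hce.2]
          · by_cases hdq : c = '.'
            · subst hdq; simp [pvStep]
            · simp [pvStep, hcd, hdq, hce.1, hce.2]
          · by_cases hdq : c = '.'
            · subst hdq; simp [pvStep]
            · simp [pvStep, hcd, hu, hdq, hce.1, hce.2]
        rw [st1, simRj, pvFin_rj]

-- fraction part: from state .pi (int digits seen) or .p0 (none seen), with d1 the int digits
theorem simFrac : ∀ (q : BSt) (r1 : List Char) (M : ℕ) (d1 : List Char),
    natOfDigits d1 = M →
    (q = BSt.pi ∧ d1 ≠ [] ∨ q = BSt.p0 ∧ d1 = []) →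
    pvFin (List.foldl pvStep (q, M, 0, 0, false) r1)
      = (let (d2, r2) := dpOr r1
         if d1 = [] ∧ d2 = [] then none else parseExp (d1 ++ d2) d2.length r2) := by
  intro q r1 M d1 hM hq
  cases r1 with
  | nil =>
    rcases hq with ⟨h, hne⟩ | ⟨h, hnil⟩ <;> subst h
    · -- "12." : valid, parseExp d1 0 []
      have := simT BSt.pi [] M 0 d1 hM (Or.inr (Or.inl rfl))
        (by intro c r h; cases h) (by rintro (h | h) <;> simp_all) (by intro h; cases h)
      rw [this]
      simp [dpOr, digitpart?, hne, parseExp]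
    · subst hnil; simp [pvFin, dpOr, digitpart?]
  | cons d2c r2t =>
    by_cases hd2 : d2c.isDigit
    · have hdp2 : dpOr (d2c :: r2t) = (d2c :: (dpGo [] r2t).1, (dpGo [] r2t).2) := by
        simp [dpOr, digitpart?, hd2]
        rw [dpGo_acc r2t.length r2t le_rfl]
        simp
      have st2 : List.foldl pvStep (q, M, 0, 0, false) (d2c :: r2t)
          = List.foldl pvStep (BSt.f, M * 10 + (d2c.toNat - 48), 1, 0, false) r2t := by
        rcases hq with ⟨h, _⟩ | ⟨h, _⟩ <;> subst h <;> simp [pvStep, hd2]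
      rw [st2, simF r2t.length r2t le_rfl, hdp2]
      have hmant : natOfDigits (d1 ++ d2c :: (dpGo [] r2t).1)
          = dnum (M * 10 + (d2c.toNat - 48)) (dpGo [] r2t).1 := by
        rw [natOfDigits_eq_dnum, dnum_append, ← hM]
        simp [natOfDigits_eq_dnum, dnum]
      have hlen : (1 : ℕ) + (dpGo [] r2t).1.length = (d2c :: (dpGo [] r2t).1).length := by
        simp [Nat.add_comm]
      have hT := simT BSt.f (dpGo [] r2t).2 (dnum (M * 10 + (d2c.toNat - 48)) (dpGo [] r2t).1)
          (1 + (dpGo [] r2t).1.length) (d1 ++ d2c :: (dpGo [] r2t).1) hmant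
          (Or.inr (Or.inr rfl))
          (by intro c r h
              rcases dp0_suffix r2t.length r2t le_rfl with h0 | ⟨c', r', hs, hcd, _⟩
              · rw [h0] at h; cases h
              · rw [hs] at h; cases h; exact hcd)
          (by rintro - r h
              rcases dp0_suffix r2t.length r2t le_rfl with h0 | ⟨c', r', hs, hcd, hund⟩
              · rw [h0] at h; cases h
              · rw [hs] at h; cases h; exact hund rfl)
          (by intro h; cases h)
      rw [hT]
      have hne : ¬(d1 = [] ∧ d2c :: (dpGo [] r2t).1 = []) := by simp
      simp only [hne, if_false, hlen]
    · have hdp2 : dpOr (d2c :: r2t) = ([], d2c :: r2t) := by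
        simp [dpOr, digitpart?, hd2]
      rw [hdp2]
      rcases hq with ⟨h, hne⟩ | ⟨h, hnil⟩ <;> subst h
      · have hT := simT BSt.pi (d2c :: r2t) M 0 d1 hM (Or.inr (Or.inl rfl))
          (by intro c r h; cases h; simpa using hd2)
          (by rintro (h | h) <;> simp_all) (by intro h; cases h)
        rw [hT]
        simp [hne, parseExp]
      · subst hnil
        have st2 : List.foldl pvStep (BSt.p0, M, 0, 0, false) (d2c :: r2t)
            = List.foldl pvStep (BSt.rj, M, 0, 0, false) r2t := by simp [pvStep, hd2]
        rw [st2, simRj, pvFin_rj]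
        simp

theorem mag_eq : ∀ (t : List Char), pvLit? t = parseMag t := by
  intro t
  cases t with
  | nil => rfl
  | cons c r =>
    by_cases hd : c.isDigit
    · have hdp : dpOr (c :: r) = (c :: (dpGo [] r).1, (dpGo [] r).2) := by
        simp [dpOr, digitpart?, hd]
        rw [dpGo_acc r.length r le_rfl]
        simp
      have hst : List.foldl pvStep (BSt.s0, 0, 0, 0, false) (c :: r)
          = List.foldl pvStep (BSt.i, 0 * 10 + (c.toNat - 48), 0, 0, false) r := by
        simp [pvStep, hd]
      have hM : natOfDigits (c :: (dpGo [] r).1) = dnum (0 * 10 + (c.toNat - 48)) (dpGo [] r).1 := by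
        simp [natOfDigits, dnum]
      rw [pvLit?, hst, simI r.length r le_rfl]
      have hmag : parseMag (c :: r) = afterInt (c :: (dpGo [] r).1) (dpGo [] r).2 := by
        rw [parseMag, hdp]
      rw [hmag]
      rcases dp0_suffix r.length r le_rfl with h0 | ⟨c1, r1, hs, hcd1, hund⟩
      · rw [h0]
        have hT := simT BSt.i [] (dnum (0 * 10 + (c.toNat - 48)) (dpGo [] r).1) 0
            (c :: (dpGo [] r).1) hM.symm (Or.inl rfl)
            (by intro a b h; cases h) (by rintro - b h; cases h) (by intro _ b h; cases h)
        rw [List.foldl_nil] at hT ⊢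
        rw [hT]
        simp [afterInt, parseExp]
      · rw [hs]
        by_cases hdot : c1 = '.'
        · subst hdot
          have st1 : List.foldl pvStep (BSt.i, dnum (0 * 10 + (c.toNat - 48)) (dpGo [] r).1, 0, 0, false) ('.' :: r1)
              = List.foldl pvStep (BSt.pi, dnum (0 * 10 + (c.toNat - 48)) (dpGo [] r).1, 0, 0, false) r1 := by
            simp [pvStep]
          rw [st1]
          have hF := simFrac BSt.pi r1 (dnum (0 * 10 + (c.toNat - 48)) (dpGo [] r).1)
              (c :: (dpGo [] r).1) hM.symm (Or.inl ⟨rfl, by simp⟩)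
          rw [hF]
          simp [afterInt]
        · have hT := simT BSt.i (c1 :: r1) (dnum (0 * 10 + (c.toNat - 48)) (dpGo [] r).1) 0
              (c :: (dpGo [] r).1) hM.symm (Or.inl rfl)
              (by intro a b h; cases h; exact hcd1)
              (by rintro - b h; cases h; exact hund rfl)
              (by intro _ b h; injection h with h1 _; exact hdot h1)
          rw [hT]
          have hai : afterInt (c :: (dpGo [] r).1) (c1 :: r1)
              = if (c :: (dpGo [] r).1) = [] then none
                else parseExp (c :: (dpGo [] r).1) 0 (c1 :: r1) := by
            simp [afterInt, hdot]
          rw [hai]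
          simp [parseExp]
    · by_cases hdot : c = '.'
      · subst hdot
        have hdp : dpOr ('.' :: r) = ([], '.' :: r) := by simp [dpOr, digitpart?]
        have hmag : parseMag ('.' :: r) = afterInt [] ('.' :: r) := by rw [parseMag, hdp]
        have st1 : List.foldl pvStep (BSt.s0, 0, 0, 0, false) ('.' :: r)
            = List.foldl pvStep (BSt.p0, 0, 0, 0, false) r := by simp [pvStep]
        rw [pvLit?, st1, hmag]
        have hF := simFrac BSt.p0 r 0 [] rfl (Or.inr ⟨rfl, rfl⟩)
        rw [hF]
        simp [afterInt]
      · have hdp : dpOr (c :: r) = ([], c :: r) := by simp [dpOr, digitpart?, hd]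
        have hmag : parseMag (c :: r) = afterInt [] (c :: r) := by rw [parseMag, hdp]
        have st1 : List.foldl pvStep (BSt.s0, 0, 0, 0, false) (c :: r)
            = List.foldl pvStep (BSt.rj, 0, 0, 0, false) r := by simp [pvStep, hd, hdot]
        rw [pvLit?, st1, simRj, pvFin_rj, hmag]
        simp [afterInt, hdot]

def keyPF : PF → WithTop ℚ
  | .pinf => ⊤
  | .fin q => (q : WithTop ℚ)
  | _ => ⊤

theorem mkVal_nonneg (a : List Char) (b : ℕ) (e : ℤ) : 0 ≤ mkVal a b e := by
  unfold mkVal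
  positivity

theorem parseExp_nonneg : ∀ (mant : List Char) (fl : ℕ) (s : List Char) (q : ℚ),
    parseExp mant fl s = some q → 0 ≤ q := by
  intro mant fl s q h
  cases s with
  | nil =>
    simp only [parseExp, Option.some.injEq] at h
    exact h ▸ mkVal_nonneg _ _ _
  | cons c r =>
    rw [parseExp.eq_def] at h
    by_cases hce : c = 'e' ∨ c = 'E'
    · simp only [hce, or_true, true_or, if_true, if_pos] at h
      split at h
      · rename_i d3 heq
        simp only [Option.some.injEq] at h
        exact h ▸ mkVal_nonneg _ _ _
      · cases h
    · simp only [if_neg hce] at h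
      cases h

theorem parseMag_nonneg : ∀ (cs : List Char) (q : ℚ), parseMag cs = some q → 0 ≤ q := by
  intro cs q h
  rw [parseMag.eq_def] at h
  rcases hdp : dpOr cs with ⟨d1, r1⟩
  rw [hdp] at h
  simp only at h
  rw [afterInt.eq_def] at h
  split at h
  · rename_i r
    rcases hdp2 : dpOr r with ⟨d2, r2⟩
    rw [hdp2] at h
    simp only at h
    split at h
    · cases h
    · exact parseExp_nonneg _ _ _ _ h
  · split at h
    · cases h
    · exact parseExp_nonneg _ _ _ _ h

theorem rhe_nonneg (t : ℚ) (ht : 0 ≤ t) : 0 ≤ roundHalfEven t := by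
  unfold roundHalfEven
  dsimp only
  have h0 : 0 ≤ ⌊t⌋ := Int.floor_nonneg.mpr ht
  split_ifs <;> omega

theorem roundMag_nonneg (q : ℚ) (hq : 0 < q) (r : ℚ) (h : roundMag q = some r) : 0 ≤ r := by
  unfold roundMag at h
  dsimp only at h
  split_ifs at h
  simp only [Option.some.injEq] at h
  have h2 : (0:ℚ) < (2:ℚ) ^ max (Int.log 2 q - 52) (-1074 : ℤ) := by positivity
  have ht : 0 ≤ q / (2:ℚ) ^ max (Int.log 2 q - 52) (-1074 : ℤ) := le_of_lt (div_pos hq h2)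
  have hn : (0:ℤ) ≤ roundHalfEven (q / (2:ℚ) ^ max (Int.log 2 q - 52) (-1074 : ℤ)) :=
    rhe_nonneg _ ht
  rw [← h]
  have : (0:ℚ) ≤ (roundHalfEven (q / (2:ℚ) ^ max (Int.log 2 q - 52) (-1074 : ℤ)) : ℚ) := by
    exact_mod_cast hn
  positivity

theorem rhe_eq (t : ℚ) :
    (if 1/2 < t - (⌊t⌋:ℚ) ∨ (t - (⌊t⌋:ℚ) = 1/2 ∧ ⌊t⌋ % 2 ≠ 0) then ⌊t⌋ + 1 else ⌊t⌋)
      = roundHalfEven t := by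
  unfold roundHalfEven
  dsimp only
  by_cases h1 : t - (⌊t⌋:ℚ) < 1/2
  · rw [if_pos h1, if_neg]
    rintro (h | ⟨h, -⟩) <;> linarith
  · by_cases h2 : 1/2 < t - (⌊t⌋:ℚ)
    · rw [if_neg h1, if_pos h2, if_pos (Or.inl h2)]
    · have heq : t - (⌊t⌋:ℚ) = 1/2 := le_antisymm (not_lt.mp h2) (not_lt.mp h1)
      rw [if_neg h1, if_neg h2]
      by_cases h3 : ⌊t⌋ % 2 = 0
      · rw [if_pos h3, if_neg]
        rintro (h | ⟨-, h⟩)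
        · linarith
        · exact h h3
      · rw [if_neg h3, if_pos (Or.inr ⟨heq, h3⟩)]

theorem pvDbl_eq (v : ℚ) : pvDbl v = roundMag v := by
  unfold pvDbl roundMag
  dsimp only
  rw [rhe_eq]
  by_cases h : (2:ℚ)^(1024:ℤ) ≤
      (((roundHalfEven (v / 2 ^ max (Int.log 2 v - 52) (-1074:ℤ)) : ℤ) : ℚ)
        * 2 ^ max (Int.log 2 v - 52) (-1074:ℤ))
  · rw [if_neg (not_lt.mpr h), if_pos h]
  · rw [if_pos (not_le.mp h), if_neg h]

theorem signs_eq (l : List Char) : pvSign l = pySignSplit l := by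
  match l with
  | [] => rfl
  | c :: r =>
    by_cases hp : c = '+'
    · subst hp; rfl
    · by_cases hmn : c = '-'
      · subst hmn; rfl
      · simp [pvSign, pySignSplit, hp, hmn]

theorem parser_eq (s : String) :
    pvPosKey? s = (pyFloat? s).bind (fun v => if fpos v then some (keyPF v) else none) := by
  unfold pvPosKey? pyFloat?
  dsimp only
  rw [signs_eq]
  rcases hsg : pySignSplit (PySem.Chars.strip s.toList) with ⟨neg, cs1⟩
  simp only
  by_cases hinf : PySem.Chars.lower cs1 = ['i','n','f'] ∨ PySem.Chars.lower cs1 = ['i','n','f','i','n','i','t','y']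
  · cases neg <;> simp [hinf, fpos, keyPF]
  · by_cases hnan : PySem.Chars.lower cs1 = ['n','a','n']
    · simp [hinf, hnan, fpos]
    · simp only [hinf, hnan, if_false]
      rw [mag_eq]
      cases hq : parseMag cs1 with
      | none => simp
      | some q =>
        by_cases hq0 : q = 0
        · subst hq0
          simp [fpos]
        · have hqpos : 0 < q :=
            lt_of_le_of_ne (parseMag_nonneg cs1 q hq) (Ne.symm hq0)
          dsimp only
          rw [pvDbl_eq]
          simp only [if_neg hq0]
          cases hr : roundMag q with
          | none =>
            cases neg <;> simp [fpos, keyPF, hq0]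
          | some r =>
            have hrn : 0 ≤ r := roundMag_nonneg q hqpos r hr
            cases neg with
            | true =>
              have hnr : ¬(0 < -r) := by linarith
              simp [fpos, hnr, hq0]
            | false =>
              by_cases hr0 : r = 0
              · subst hr0; simp [fpos, hq0]
              · have hpr : 0 < r := lt_of_le_of_ne hrn (Ne.symm hr0)
                simp [fpos, keyPF, hpr, hq0, hr0]

-- ---- row-level bridges ----
theorem flt_key (a b : PF) (ha : fpos a = true) (hb : fpos b = true) :
    flt a b = decide (keyPF a < keyPF b) := by
  cases a <;> cases b <;> simp_all [fpos, flt, keyPF]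

theorem key_isSome (s : String) : (pvPosKey? s).isSome = is_valid_numeric s := by
  rw [parser_eq]
  unfold is_valid_numeric
  cases h : pyFloat? s with
  | none => rfl
  | some v => cases hv : fpos v <;> simp [hv]

theorem key_val (s : String) (k : WithTop ℚ) (h : pvPosKey? s = some k) :
    ∃ v, pyFloat? s = some v ∧ fpos v = true ∧ keyPF v = k := by
  rw [parser_eq] at h
  cases hf : pyFloat? s with
  | none => rw [hf] at h; cases h
  | some v =>
    rw [hf] at h
    by_cases hv : fpos v
    · simp only [hv, if_true, Option.some.injEq, Option.bind_some] at h
      exact ⟨v, rfl, hv, h⟩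
    · simp [hv] at h

theorem testA_eq (f : Int) (row : List String) :
    (row.isEmpty || decide ((PySem.List.len row) ≤ f) ||
      (match PySem.List.pyGet? row f with
       | none => true
       | some s => decide (s = "") || !is_valid_numeric s)) = (pvKeyRow f row).isNone := by
  unfold pvKeyRow
  by_cases hE : row.isEmpty
  · simp [hE]
  · by_cases hL : (PySem.List.len row) ≤ f
    · have hL' : (row.length : Int) ≤ f := by simpa [PySem.List.len] using hL
      simp [hE, hL']
    · simp only [hE, hL, Bool.false_or, decide_false, if_false]
      cases hG : PySem.List.pyGet? row f with
      | none => rfl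
      | some s =>
        dsimp only
        by_cases hs : s = ""
        · simp [hs]
        · simp only [hs, decide_false, Bool.false_or, if_false, if_neg]
          rw [← key_isSome s]
          cases hk : pvPosKey? s <;> simp

theorem valueA (f : Int) (row : List String) (k : WithTop ℚ) (h : pvKeyRow f row = some k) :
    fpos (match PySem.List.pyGet? row f with
      | none => PF.nan
      | some s => (pyFloat? s).getD PF.nan) = true ∧
    keyPF (match PySem.List.pyGet? row f with
      | none => PF.nan
      | some s => (pyFloat? s).getD PF.nan) = k := by
  unfold pvKeyRow at h
  by_cases h0 : (row.isEmpty || decide ((PySem.List.len row) ≤ f)) = true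
  · rw [if_pos h0] at h; cases h
  · rw [if_neg h0] at h
    cases hG : PySem.List.pyGet? row f with
    | none => rw [hG] at h; cases h
    | some s =>
      rw [hG] at h
      dsimp only at h
      by_cases hs : s = ""
      · rw [if_pos hs] at h; cases h
      · rw [if_neg hs] at h
        obtain ⟨v, hf, hfp, hk⟩ := key_val s k h
        simp [hG, hf, hfp, hk]

-- ---- middle layer: the runs as one sequential index scan over the keys ----
mutual
def seqO (rows : List (List String)) (ks : List (Option (WithTop ℚ))) (i : ℕ) :
    List (List (List String)) :=
  if _h : i < rows.length then
    match ks.getD i none with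
    | none => seqO rows ks (i + 1)
    | some _ => seqI rows ks i (i + 1)
  else []
  termination_by (rows.length + 1 - i, 0)
  decreasing_by all_goals simp_wf <;> omega
def seqI (rows : List (List String)) (ks : List (Option (WithTop ℚ))) (s j : ℕ) :
    List (List (List String)) :=
  if _h : j < rows.length then
    match ks.getD j none, ks.getD (j - 1) none with
    | some w, some p =>
      if w < p then PySem.List.slice rows (some (s : Int)) (some (j : Int)) :: seqO rows ks j
      else seqI rows ks s (j + 1)
    | _, _ => PySem.List.slice rows (some (s : Int)) (some (j : Int)) :: seqO rows ks j
  else PySem.List.slice rows (some (s : Int)) (some (j : Int)) :: seqO rows ks j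
  termination_by (rows.length + 1 - j, 1)
  decreasing_by all_goals simp_wf <;> omega
end

theorem ks_getD (rows : List (List String)) (f : Int) (i : ℕ) (h : i < rows.length) :
    (rows.map (pvKeyRow f)).getD i none = pvKeyRow f rows[i] := by
  simp [List.getD, List.getElem?_map, h]

theorem seqO_ge (rows : List (List String)) (ks : List (Option (WithTop ℚ))) (i : ℕ)
    (h : rows.length ≤ i) : seqO rows ks i = [] := by
  rw [seqO]; simp [Nat.not_lt.mpr h]

theorem seqO_none (rows : List (List String)) (ks : List (Option (WithTop ℚ))) (i : ℕ)
    (h : i < rows.length) (hv : ks.getD i none = none) :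
    seqO rows ks i = seqO rows ks (i + 1) := by
  rw [List.getD_eq_getElem?_getD] at hv
  rw [seqO]; simp [h, hv]

theorem seqO_some (rows : List (List String)) (ks : List (Option (WithTop ℚ))) (i : ℕ)
    (w : WithTop ℚ) (h : i < rows.length) (hv : ks.getD i none = some w) :
    seqO rows ks i = seqI rows ks i (i + 1) := by
  rw [List.getD_eq_getElem?_getD] at hv
  rw [seqO]; simp [h, hv]

theorem seqI_end (rows : List (List String)) (ks : List (Option (WithTop ℚ))) (s j : ℕ)
    (h : rows.length ≤ j) :
    seqI rows ks s j = PySem.List.slice rows (some (s : Int)) (some (j : Int)) :: seqO rows ks j := by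
  rw [seqI]; simp [Nat.not_lt.mpr h]

theorem seqI_none (rows : List (List String)) (ks : List (Option (WithTop ℚ))) (s j : ℕ)
    (h : j < rows.length) (hv : ks.getD j none = none) :
    seqI rows ks s j = PySem.List.slice rows (some (s : Int)) (some (j : Int)) :: seqO rows ks j := by
  rw [List.getD_eq_getElem?_getD] at hv
  rw [seqI]; simp [h, hv]

theorem seqI_drop (rows : List (List String)) (ks : List (Option (WithTop ℚ))) (s j : ℕ)
    (w p : WithTop ℚ) (h : j < rows.length) (hw : ks.getD j none = some w)
    (hp : ks.getD (j - 1) none = some p) (hlt : w < p) :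
    seqI rows ks s j = PySem.List.slice rows (some (s : Int)) (some (j : Int)) :: seqO rows ks j := by
  rw [List.getD_eq_getElem?_getD] at hw hp
  rw [seqI]; simp [h, hw, hp, hlt]

theorem seqI_cont (rows : List (List String)) (ks : List (Option (WithTop ℚ))) (s j : ℕ)
    (w p : WithTop ℚ) (h : j < rows.length) (hw : ks.getD j none = some w)
    (hp : ks.getD (j - 1) none = some p) (hlt : ¬(w < p)) :
    seqI rows ks s j = seqI rows ks s (j + 1) := by
  rw [List.getD_eq_getElem?_getD] at hw hp
  rw [seqI]; simp [h, hw, hp, hlt]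

-- A's loop followed by the final save, as one function (proof helper)
def finishA (rows : List (List String)) (st : List (List (List String)) × Option Int × Option PF) :
    List (List (List String)) :=
  match st with
  | (runs, some s, _) => runs ++ [PySem.List.slice rows (some s) (some (PySem.List.len rows))]
  | (runs, none, _) => runs

-- the A-side invariant: A's pass over the enumerated suffix from i equals the index scan from i
theorem main_inv (rows : List (List String)) (f : Int) :
    ∀ d i, i ≤ rows.length → rows.length - i = d →
      (∀ runs, finishA rows (loopA rows f (PySem.List.enumerate (rows.drop i) i) (runs, none, none))
          = runs ++ seqO rows (rows.map (pvKeyRow f)) i)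
      ∧ (∀ runs (s : ℕ) (p : PF), fpos p = true →
          (rows.map (pvKeyRow f)).getD (i - 1) none = some (keyPF p) → 1 ≤ i →
          finishA rows (loopA rows f (PySem.List.enumerate (rows.drop i) i) (runs, some (s : Int), some p))
          = runs ++ seqI rows (rows.map (pvKeyRow f)) s i) := by
  intro d
  induction d with
  | zero =>
    intro i hle hd
    have hi : i = rows.length := by omega
    subst hi
    rw [List.drop_length]
    constructor
    · intro runs
      simp [PySem.List.enumerate, loopA, finishA, seqO_ge rows _ rows.length le_rfl]
    · intro runs s p _ _ _
      simp only [PySem.List.enumerate, loopA, finishA]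
      rw [seqI_end rows _ s rows.length le_rfl, seqO_ge rows _ rows.length le_rfl]
      simp [PySem.List.len]
  | succ d ih =>
    intro i hle hd
    have hi : i < rows.length := by omega
    have hdrop : rows.drop i = rows[i] :: rows.drop (i + 1) := List.drop_eq_getElem_cons hi
    have hih := ih (i + 1) (by omega) (by omega)
    have hcast : (i : Int) + 1 = ((i + 1 : ℕ) : Int) := by push_cast; ring
    have henum : PySem.List.enumerate (rows.drop i) (i : Int)
        = ((i : Int), rows[i]) :: PySem.List.enumerate (rows.drop (i + 1)) ((i + 1 : ℕ) : Int) := by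
      rw [hdrop, PySem.List.enumerate_cons, hcast]
    have hvg := ks_getD rows f i hi
    constructor
    · intro runs
      rw [henum]
      simp only [loopA, testA_eq]
      cases hv : pvKeyRow f rows[i] with
      | none =>
        rw [hv] at hvg
        simp only [hv, Option.isNone_none, if_pos]
        rw [(hih).1 runs, seqO_none rows _ i hi hvg]
      | some k =>
        rw [hv] at hvg
        obtain ⟨hfp, hkey⟩ := valueA f rows[i] k hv
        simp only [hv, Option.isNone_some, Bool.false_eq_true, if_false]
        rw [(hih).2 runs i _ hfp (by simpa [hkey] using hvg) (by omega),
          seqO_some rows _ i k hi hvg]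
    · intro runs s p hfpp hp hi1
      rw [henum]
      simp only [loopA, testA_eq]
      cases hv : pvKeyRow f rows[i] with
      | none =>
        rw [hv] at hvg
        simp only [hv, Option.isNone_none, if_pos]
        rw [(hih).1 (runs ++ [PySem.List.slice rows (some (s : Int)) (some (i : Int))]),
          seqI_none rows _ s i hi hvg, seqO_none rows _ i hi hvg]
        simp
      | some k =>
        rw [hv] at hvg
        obtain ⟨hfp, hkey⟩ := valueA f rows[i] k hv
        simp only [hv, Option.isNone_some, Bool.false_eq_true, if_false]
        rw [flt_key _ p hfp hfpp, hkey]
        by_cases hlt : (k < keyPF p)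
        · simp only [hlt, decide_true, if_true]
          rw [(hih).2 (runs ++ [PySem.List.slice rows (some (s : Int)) (some (i : Int))]) i _
              hfp (by simpa [hkey] using hvg) (by omega),
            seqI_drop rows _ s i k (keyPF p) hi hvg hp hlt, seqO_some rows _ i k hi hvg]
          simp
        · simp only [hlt, decide_false, Bool.false_eq_true, if_false]
          rw [(hih).2 runs s _ hfp (by simpa [hkey] using hvg) (by omega),
            seqI_cont rows _ s i k (keyPF p) hi hvg hp hlt]

-- ---- staged (B) vs the sequential scan ----
def sliceMap (rows : List (List String)) (bs : List (ℕ × ℕ)) : List (List (List String)) :=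
  bs.map (fun ab => PySem.List.slice rows (some (ab.1 : Int)) (some (ab.2 : Int)))

def outB (rows : List (List String)) (L : List (List (ℕ × WithTop ℚ))) : List (List (List String)) :=
  (L.flatMap pvSegBounds).map (fun ab => PySem.List.slice rows (some (ab.1 : Int)) (some (ab.2 : Int)))

theorem outB_append (rows : List (List String)) (X Y : List (List (ℕ × WithTop ℚ))) :
    outB rows (X ++ Y) = outB rows X ++ outB rows Y := by
  simp [outB]

theorem outB_single (rows : List (List String)) (seg : List (ℕ × WithTop ℚ)) :
    outB rows [seg] = sliceMap rows (pvSegBounds seg) := by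
  simp [outB, sliceMap]

theorem sliceMap_append (rows : List (List String)) (a b : List (ℕ × ℕ)) :
    sliceMap rows (a ++ b) = sliceMap rows a ++ sliceMap rows b := by
  simp [sliceMap]

-- partial bounds state: (emitted cuts, current sub-run start)
def pvPart : ℕ → List ((ℕ × WithTop ℚ) × (ℕ × WithTop ℚ)) → List (ℕ × ℕ) × ℕ
  | st, [] => ([], st)
  | st, (pr, cu) :: ps =>
    if cu.2 < pr.2 then ((st, cu.1) :: (pvPart cu.1 ps).1, (pvPart cu.1 ps).2)
    else pvPart st ps

theorem cuts_eq : ∀ (ps : List ((ℕ × WithTop ℚ) × (ℕ × WithTop ℚ))) (st fin : ℕ),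
    pvCuts st ps fin = (pvPart st ps).1 ++ [((pvPart st ps).2, fin)] := by
  intro ps
  induction ps with
  | nil => intros; simp [pvCuts, pvPart]
  | cons x ps ih =>
    intro st fin
    obtain ⟨pr, cu⟩ := x
    by_cases h : cu.2 < pr.2 <;> simp [pvCuts, pvPart, h, ih]

theorem part_app : ∀ (ps : List ((ℕ × WithTop ℚ) × (ℕ × WithTop ℚ))) (st : ℕ)
    (pr cu : ℕ × WithTop ℚ),
    pvPart st (ps ++ [(pr, cu)])
      = (if cu.2 < pr.2 then ((pvPart st ps).1 ++ [((pvPart st ps).2, cu.1)], cu.1)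
         else pvPart st ps) := by
  intro ps
  induction ps with
  | nil =>
    intro st pr cu
    by_cases h : cu.2 < pr.2 <;> simp [pvPart, h]
  | cons x ps ih =>
    intro st pr cu
    obtain ⟨a, b⟩ := x
    by_cases h1 : b.2 < a.2 <;> by_cases h2 : cu.2 < pr.2 <;>
      simp [pvPart, h1, h2, ih]

theorem zip_tail_concat : ∀ (seg : List (ℕ × WithTop ℚ)) (L x : ℕ × WithTop ℚ),
    seg.getLast? = some L →
    (seg ++ [x]).zip (seg ++ [x]).tail = seg.zip seg.tail ++ [(L, x)] := by
  intro seg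
  induction seg with
  | nil => intro L x h; cases h
  | cons a seg ih =>
    intro L x h
    cases seg with
    | nil =>
      simp at h
      subst h
      simp
    | cons b seg2 =>
      have h2 : (b :: seg2).getLast? = some L := by
        rwa [List.getLast?_cons_cons] at h
      have hih := ih L x h2
      simpa using hih

theorem segGo_acc : ∀ (rest : List (List String)) (fc : Int) (ix : ℕ)
    (acc : List (List (ℕ × WithTop ℚ))) (seg : List (ℕ × WithTop ℚ)),
    pvSegGo fc ix rest acc seg = acc ++ pvSegGo fc ix rest [] seg := by
  intro rest
  induction rest with
  | nil =>
    intro fc ix acc seg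
    by_cases e : seg.isEmpty <;> simp [pvSegGo, e]
  | cons r rest ih =>
    intro fc ix acc seg
    cases hk : pvKeyRow fc r with
    | none =>
      simp only [pvSegGo, hk]
      rw [ih fc (ix + 1) (if seg.isEmpty then acc else acc ++ [seg]) [],
        ih fc (ix + 1) (if seg.isEmpty then [] else [] ++ [seg]) []]
      by_cases e : seg.isEmpty <;> simp [e]
    | some k =>
      simp only [pvSegGo, hk]
      rw [ih fc (ix + 1) acc (seg ++ [(ix, k)])]

theorem staged_inv (rows : List (List String)) (f : Int) :
    ∀ d i, i ≤ rows.length → rows.length - i = d →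
      (outB rows (pvSegGo f i (rows.drop i) [] [])
         = seqO rows (rows.map (pvKeyRow f)) i)
      ∧ (∀ (seg : List (ℕ × WithTop ℚ)) (i0 : ℕ) (k0 kp : WithTop ℚ),
          seg.head? = some (i0, k0) → seg.getLast? = some (i - 1, kp) →
          (rows.map (pvKeyRow f)).getD (i - 1) none = some kp → 1 ≤ i →
          outB rows (pvSegGo f i (rows.drop i) [] seg)
            = sliceMap rows (pvPart i0 (seg.zip seg.tail)).1
              ++ seqI rows (rows.map (pvKeyRow f)) (pvPart i0 (seg.zip seg.tail)).2 i) := by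
  intro d
  induction d with
  | zero =>
    intro i hle hd
    have hi : i = rows.length := by omega
    subst hi
    rw [List.drop_length]
    constructor
    · simp [pvSegGo, outB, seqO_ge rows _ rows.length le_rfl]
    · intro seg i0 k0 kp hhead hlast hks h1
      match seg, hhead with
      | (i0, k0) :: t, rfl =>
        have hne : ((i0, k0) :: t).isEmpty = false := rfl
        simp only [pvSegGo, hne, Bool.false_eq_true, if_false, List.nil_append]
        rw [outB_single]
        simp only [pvSegBounds]
        have hgl : (((i0, k0) :: t).getLastD (0, ⊤)) = (rows.length - 1, kp) := by
          rw [List.getLastD_eq_getLast?, hlast]; rfl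
        rw [hgl]
        dsimp only
        rw [cuts_eq]
        have hfin : rows.length - 1 + 1 = rows.length := by omega
        rw [hfin, sliceMap_append]
        rw [seqI_end rows _ _ rows.length le_rfl, seqO_ge rows _ rows.length le_rfl]
        rfl
  | succ d ih =>
    intro i hle hd
    have hi : i < rows.length := by omega
    have hdrop : rows.drop i = rows[i] :: rows.drop (i + 1) := List.drop_eq_getElem_cons hi
    have hih := ih (i + 1) (by omega) (by omega)
    have hvg := ks_getD rows f i hi
    constructor
    · rw [hdrop]
      simp only [pvSegGo]
      cases hv : pvKeyRow f rows[i] with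
      | none =>
        rw [hv] at hvg
        simp only [List.isEmpty_nil, if_true]
        rw [hih.1, seqO_none rows _ i hi hvg]
      | some k =>
        rw [hv] at hvg
        have h2 := hih.2 [(i, k)] i k k rfl (by simp) (by simpa using hvg) (by omega)
        simp only [List.nil_append] at h2 ⊢
        rw [h2, seqO_some rows _ i k hi hvg]
        simp [pvPart, sliceMap]
    · intro seg i0 k0 kp hhead hlast hks h1
      have hsegne : seg ≠ [] := by intro h; rw [h] at hhead; cases hhead
      have hne : seg.isEmpty = false := by simpa [List.isEmpty_iff] using hsegne
      rw [hdrop]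
      simp only [pvSegGo]
      cases hv : pvKeyRow f rows[i] with
      | none =>
        rw [hv] at hvg
        simp only [hne, Bool.false_eq_true, if_false, List.nil_append]
        rw [segGo_acc _ _ _ [seg] [], outB_append, hih.1, outB_single]
        match seg, hhead with
        | (i0, k0) :: t, rfl =>
          simp only [pvSegBounds]
          have hgl : (((i0, k0) :: t).getLastD (0, ⊤)) = (i - 1, kp) := by
            rw [List.getLastD_eq_getLast?, hlast]; rfl
          rw [hgl]
          dsimp only
          rw [cuts_eq]
          have hfin : i - 1 + 1 = i := by omega
          rw [hfin, sliceMap_append]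
          rw [seqI_none rows _ _ i hi hvg, seqO_none rows _ i hi hvg]
          simp [List.append_assoc]
          rfl
      | some k =>
        rw [hv] at hvg
        have hlast' : (seg ++ [(i, k)]).getLast? = some (i, k) := by
          simp
        have hhead' : (seg ++ [(i, k)]).head? = some (i0, k0) := by
          cases seg with
          | nil => cases hhead
          | cons a t => simpa using hhead
        have h2 := hih.2 (seg ++ [(i, k)]) i0 k0 k hhead'
          (by simpa using hlast') (by simpa using hvg) (by omega)
        rw [h2, zip_tail_concat seg (i - 1, kp) (i, k) hlast, part_app]
        by_cases hlt : (k < kp)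
        · simp only [hlt, if_pos]
          rw [seqI_drop rows _ _ i k kp hi hvg hks hlt, seqO_some rows _ i k hi hvg]
          simp [sliceMap_append, sliceMap, List.append_assoc]
        · simp only [hlt, if_neg, if_false]
          rw [seqI_cont rows _ _ i k kp hi hvg hks hlt]

theorem staged_eq (rows : List (List String)) (f : Int) :
    find_probable_runs_alt rows f = seqO rows (rows.map (pvKeyRow f)) 0 := by
  have h := (staged_inv rows f rows.length 0 (Nat.zero_le _) (by omega)).1
  rw [List.drop_zero] at h
  exact h

theorem A_eq_seq (rows : List (List String)) (f : Int) :
    find_probable_runs rows f = seqO rows (rows.map (pvKeyRow f)) 0 := by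
  have h := (main_inv rows f rows.length 0 (Nat.zero_le _) (by omega)).1 []
  rw [List.drop_zero] at h
  unfold find_probable_runs
  simpa [finishA] using h


-- ===== VERDICT (by name: the statement is the Claim_ definition above) =====
theorem find_probable_runs_spec : Claim_equal_find_probable_runs := by
  intro rows f _ _
  unfold Spec_find_probable_runs
  rw [A_eq_seq, staged_eq]
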